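-- pv_equiv track=rewrite | github.com/Korblen/projet_algo_python | exercice_02.py | resolve_two_loops
-- ===== SOURCE A (Python) =====
-- def resolve_two_loops(list):
--     result = []
--     for i, elements in enumerate(list):
--         for j, secondelement in enumerate(list):
--             if j>i and secondelement > elements :
--                 break
--         else:
--             result.append(elements)
--     return len(result)
-- ===== SOURCE B (Python) =====
-- def resolve_two_loops(list):
--     count = 0
--     best = None
--     for x in reversed(list):
--         if best is None or x >= best:
--             count += 1
--             best = x
--     return count
-- ===== Notes on version B (the rewrite author's own statement) =====
-- stated objective: faster
-- what changed: Replaces A's nested scan (for each element, search all later elements for a larger one) with a single right-to-left pass over the list tracking the running maximum.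
import Mathlib
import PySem

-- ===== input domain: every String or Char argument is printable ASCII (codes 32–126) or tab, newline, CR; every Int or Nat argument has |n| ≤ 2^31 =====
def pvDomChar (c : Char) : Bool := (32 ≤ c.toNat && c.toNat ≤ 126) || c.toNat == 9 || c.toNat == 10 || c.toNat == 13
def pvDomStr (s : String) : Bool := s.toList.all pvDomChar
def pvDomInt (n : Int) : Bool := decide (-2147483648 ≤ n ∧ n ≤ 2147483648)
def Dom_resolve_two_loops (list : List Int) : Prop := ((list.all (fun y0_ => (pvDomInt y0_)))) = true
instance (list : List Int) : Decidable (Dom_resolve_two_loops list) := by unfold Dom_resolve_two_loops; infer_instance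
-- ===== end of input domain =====

-- B replaces A's quadratic scan-ahead-for-a-larger-element with one right-to-left pass tracking the running maximum (faster, O(n) vs O(n^2)).

-- ===== PORT A =====
-- inner 'for j, secondelement in enumerate(list): if j>i and secondelement>elements: break' loop:
-- returns true iff the break fires
def innerBreaks : List (Int × Int) → Int → Int → Bool
  | [], _, _ => false
  | (j, y) :: rest, i, x => if j > i ∧ y > x then true else innerBreaks rest i x

def resolve_two_loops (list : List Int) : Int :=
  let result : List Int :=
    (PySem.List.enumerate list 0).foldl
      (fun acc p => if innerBreaks (PySem.List.enumerate list 0) p.1 p.2 then acc else acc ++ [p.2]) []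
  (result.length : Int)

-- ===== PORT B =====
-- one step of the 'for x in reversed(list)' loop; state = (count, best)
def stepB (st : Int × Option Int) (x : Int) : Int × Option Int :=
  match st.2 with
  | none => (st.1 + 1, some x)
  | some b => if b ≤ x then (st.1 + 1, some x) else st

def resolve_two_loops_alt (list : List Int) : Int :=
  (list.reverse.foldl stepB (0, none)).1

-- ===== PRECONDITION & SPEC =====
def Spec_resolve_two_loops (list : List Int) (out : Int) : Prop := out = resolve_two_loops_alt list
instance (list : List Int) (out : Int) : Decidable (Spec_resolve_two_loops list out) := by unfold Spec_resolve_two_loops; infer_instance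

-- ===== CLAIM (what is proved, stated in full; the proofs are below) =====
def Claim_equal_resolve_two_loops : Prop := ∀ (list : List Int), Dom_resolve_two_loops list → Spec_resolve_two_loops list (resolve_two_loops list)

-- ===== LEMMAS AND PROOFS =====

-- common reference count: an element is counted iff no later element is strictly greater
def specCount : List Int → Int
  | [] => 0
  | x :: xs => if xs.all (fun y => decide (y ≤ x)) then specCount xs + 1 else specCount xs

-- maximum of a list, as an Option
def maxOf : List Int → Option Int
  | [] => none
  | x :: xs => some (match maxOf xs with | none => x | some b => max x b)

-- the break condition of A's inner loop, as an 'any'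
def brk (pairs : List (Int × Int)) (p : Int × Int) : Bool :=
  pairs.any (fun q => decide (p.1 < q.1 ∧ p.2 < q.2))

theorem innerBreaks_eq_any (pairs : List (Int × Int)) (i x : Int) :
    innerBreaks pairs i x = brk pairs (i, x) := by
  induction pairs with
  | nil => rfl
  | cons q rest ih =>
    obtain ⟨j, y⟩ := q
    simp only [innerBreaks, brk, List.any_cons] at *
    by_cases h : j > i ∧ y > x
    · simp [h]
    · simp only [if_neg h, ih]
      have : ¬ (i < j ∧ x < y) := h
      simp [this]

theorem foldl_len (pairs : List (Int × Int)) (cond : Int × Int → Bool) (acc : List Int) :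
    ((pairs.foldl (fun acc p => if cond p then acc else acc ++ [p.2]) acc).length : Int)
      = acc.length + pairs.countP (fun p => ! cond p) := by
  induction pairs generalizing acc with
  | nil => simp
  | cons p rest ih =>
    simp only [List.foldl_cons, List.countP_cons]
    cases h : cond p <;> simp [ih] <;> try omega

-- when every index in the enumeration exceeds i, 'any' forgets the indices
theorem brk_head (xs : List Int) (x : Int) :
    ∀ (s i : Int), i < s →
      (PySem.List.enumerate xs s).any (fun q => decide (i < q.1 ∧ x < q.2))
        = xs.any (fun y => decide (x < y)) := by
  induction xs with
  | nil => intro s i h; simp [PySem.List.enumerate_nil]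
  | cons y ys ih =>
    intro s i h
    simp only [PySem.List.enumerate_cons, List.any_cons]
    rw [ih (s + 1) i (by omega)]
    have : (i < s ∧ x < y) ↔ (x < y) := by
      constructor
      · exact fun hp => hp.2
      · exact fun hc => ⟨h, hc⟩
    simp [this]

theorem brk_eq_of_lt (xs : List Int) (s head : Int) (p : Int × Int) (hp : p.1 > s) :
    brk ((s, head) :: PySem.List.enumerate xs (s + 1)) p
      = brk (PySem.List.enumerate xs (s + 1)) p := by
  simp only [brk, List.any_cons]
  have : ¬ (p.1 < s ∧ p.2 < head) := fun h => by omega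
  simp [this]

theorem countP_enum (xs : List Int) :
    ∀ (s : Int),
      ((PySem.List.enumerate xs s).countP
          (fun p => ! brk (PySem.List.enumerate xs s) p) : Int) = specCount xs := by
  induction xs with
  | nil => intro s; simp [PySem.List.enumerate_nil, specCount]
  | cons x xs ih =>
    intro s
    simp only [PySem.List.enumerate_cons, List.countP_cons]
    -- head's condition: does some later element exceed x?
    have hhead : brk ((s, x) :: PySem.List.enumerate xs (s + 1)) (s, x)
        = xs.any (fun y => decide (x < y)) := by
      simp only [brk]
      rw [List.any_cons, brk_head xs x (s + 1) s (by omega)]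
      simp
    -- tail elements: the head pair (index s) never triggers their break
    have htail : (PySem.List.enumerate xs (s + 1)).countP
          (fun p => ! brk ((s, x) :: PySem.List.enumerate xs (s + 1)) p)
        = (PySem.List.enumerate xs (s + 1)).countP
          (fun p => ! brk (PySem.List.enumerate xs (s + 1)) p) := by
      apply List.countP_congr
      intro p hp
      have hidx : p.1 > s := by
        rcases (PySem.List.mem_enumerate_iff xs (s + 1) p).1 hp with ⟨k, hk, rfl⟩
        simp; omega
      rw [brk_eq_of_lt xs s x p hidx]
    rw [htail, hhead, Nat.cast_add, ih (s + 1)]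
    have hx : (¬ xs.any (fun y => decide (x < y)) = true) ↔ (xs.all (fun y => decide (y ≤ x)) = true) := by
      simp only [List.any_eq_true, List.all_eq_true, decide_eq_true_eq]
      constructor
      · intro h y hy; by_contra hc; exact h ⟨y, hy, by omega⟩
      · rintro h ⟨y, hy, hlt⟩; have := h y hy; omega
    simp only [specCount]
    by_cases hall : xs.all (fun y => decide (y ≤ x)) = true
    · have hany : xs.any (fun y => decide (x < y)) = false := by
        cases h : xs.any (fun y => decide (x < y))
        · rfl
        · exact absurd h (by simpa [h] using fun hh => (hx.2 hall) hh)
      simp [hany, hall]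
    · have hany : xs.any (fun y => decide (x < y)) = true := by
        by_contra h
        exact hall (hx.1 (by simpa using h))
      simp [hany, hall]

theorem maxOf_none_iff (xs : List Int) : maxOf xs = none ↔ xs = [] := by
  cases xs <;> simp [maxOf]

theorem maxOf_spec (xs : List Int) (b : Int) (h : maxOf xs = some b) :
    b ∈ xs ∧ ∀ y ∈ xs, y ≤ b := by
  induction xs generalizing b with
  | nil => simp [maxOf] at h
  | cons x xs ih =>
    simp only [maxOf] at h
    cases hm : maxOf xs with
    | none =>
      rw [hm] at h
      have hxs : xs = [] := (maxOf_none_iff xs).1 hm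
      subst hxs
      simp at h ⊢; omega
    | some c =>
      rw [hm] at h
      obtain ⟨hmem, hle⟩ := ih c hm
      have hb : b = max x c := by simpa using h.symm
      subst hb
      constructor
      · rcases le_total x c with hxc | hcx
        · rw [max_eq_right hxc]; exact List.mem_cons_of_mem _ hmem
        · rw [max_eq_left hcx]; simp
      · intro y hy
        rcases List.mem_cons.1 hy with rfl | hy'
        · exact le_max_left _ _
        · exact le_trans (hle y hy') (le_max_right _ _)

theorem foldB (xs : List Int) :
    xs.reverse.foldl stepB (0, none) = (specCount xs, maxOf xs) := by
  induction xs with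
  | nil => simp [specCount, maxOf]
  | cons x xs ih =>
    have : (x :: xs).reverse = xs.reverse ++ [x] := by simp
    rw [this, List.foldl_append, ih]
    simp only [List.foldl_cons, List.foldl_nil]
    cases hm : maxOf xs with
    | none =>
      have hxs : xs = [] := (maxOf_none_iff xs).1 hm
      subst hxs
      simp [stepB, specCount, maxOf]
    | some b =>
      obtain ⟨hmem, hle⟩ := maxOf_spec xs b hm
      simp only [stepB]
      by_cases hbx : b ≤ x
      · have hall : xs.all (fun y => decide (y ≤ x)) = true := by
          simp only [List.all_eq_true, decide_eq_true_eq]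
          exact fun y hy => le_trans (hle y hy) hbx
        have : max x b = x := max_eq_left hbx
        simp [hbx, specCount, hall, maxOf, hm]
      · have hall : ¬ xs.all (fun y => decide (y ≤ x)) = true := by
          simp only [List.all_eq_true, decide_eq_true_eq]
          intro h; exact hbx (h b hmem)
        have : max x b = b := max_eq_right (by omega)
        simp [hbx, specCount, hall, maxOf, hm]
        omega

theorem A_eq_spec (list : List Int) : resolve_two_loops list = specCount list := by
  unfold resolve_two_loops
  simp only
  rw [show (fun (acc : List Int) (p : Int × Int) =>
        if innerBreaks (PySem.List.enumerate list 0) p.1 p.2 then acc else acc ++ [p.2])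
      = (fun acc p => if brk (PySem.List.enumerate list 0) p then acc else acc ++ [p.2]) by
    funext acc p; rw [innerBreaks_eq_any]]
  rw [foldl_len]
  simpa using countP_enum list 0

theorem B_eq_spec (list : List Int) : resolve_two_loops_alt list = specCount list := by
  unfold resolve_two_loops_alt
  rw [foldB]

-- ===== VERDICT (by name: the statement is the Claim_ definition above) =====
theorem resolve_two_loops_spec : Claim_equal_resolve_two_loops := by
  intro list _
  unfold Spec_resolve_two_loops
  rw [A_eq_spec, B_eq_spec]
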